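-- pv_equiv track=rewrite | github.com/maarten990/maarten.sexy | generate.py | make_col
-- ===== SOURCE A (Python) =====
-- def make_col(sizes, goal) -> list[str]:
--     out = []
--
--     while goal > 0 and len(sizes) > 0:
--         distances = {img: goal - size for img, size in sizes.items()}
--         next = sorted(distances, key=lambda img: sizes[img], reverse=True)[0]
--         out.append(next)
--         goal -= sizes[next]
--         sizes.pop(next)
--
--     return out
-- ===== SOURCE B (Python) =====
-- def make_col(sizes, goal) -> list[str]:
--     # One stable sort by descending size, then a single greedy walk
--     # (same return value and same final mutation of `sizes` as the
--     # repeated-full-sort original).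
--     order = sorted(sizes.items(), key=lambda kv: -kv[1])
--     out = []
--     for img, size in order:
--         if goal <= 0:
--             break
--         out.append(img)
--         goal -= size
--     for img in out:
--         del sizes[img]
--     return out
-- ===== Notes on version B (the rewrite author's own statement) =====
-- stated objective: faster
-- what changed: A re-sorts the whole remaining dict (after rebuilding a distances dict) on every iteration to find the next largest image; B sorts the items once by descending size (stable, so ties keep insertion order exactly as A's stable reverse sort) and takes a single greedy prefix walk, deleting the chosen keys from sizes afterwards to reproduce A's mutation.
import Mathlib
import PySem

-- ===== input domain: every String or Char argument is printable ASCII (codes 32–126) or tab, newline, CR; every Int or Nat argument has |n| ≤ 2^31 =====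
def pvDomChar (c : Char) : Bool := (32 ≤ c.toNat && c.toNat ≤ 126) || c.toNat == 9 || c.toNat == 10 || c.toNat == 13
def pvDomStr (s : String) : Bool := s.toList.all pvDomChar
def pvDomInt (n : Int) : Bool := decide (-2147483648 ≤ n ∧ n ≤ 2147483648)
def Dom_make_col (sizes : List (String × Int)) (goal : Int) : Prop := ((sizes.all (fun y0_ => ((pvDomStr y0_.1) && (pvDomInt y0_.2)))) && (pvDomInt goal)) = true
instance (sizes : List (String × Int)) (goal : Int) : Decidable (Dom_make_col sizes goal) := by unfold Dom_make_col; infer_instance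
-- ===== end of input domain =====

-- One honest line: B replaces A's per-iteration full re-sort of the remaining dict by ONE stable
-- descending sort followed by a single greedy prefix walk (faster). Both the Python A and the
-- Python B mutate `sizes` by deleting exactly the selected keys; the equivalence proved here is
-- about the RETURN value only.

-- ===== PORT A =====

-- sizes[img]  (the key is always present at every call site of A; default never reached)
def pyLook (sizes : List (String × Int)) (img : String) : Int :=
  (PySem.Dict.mk sizes).getD img 0

-- A's selection step: build the distances dict and take the head of the reverse-sorted key list
-- (sorted(distances, key=lambda img: sizes[img], reverse=True)[0])
def nextKey (sizes : List (String × Int)) (goal : Int) : String :=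
  (PySem.List.sorted (PySem.Dict.ofList (sizes.map (fun p => (p.1, goal - p.2)))).keys
    (fun img => pyLook sizes img) true).headI

-- The next lemmas are cited by make_colAux's decreasing_by (termination only).
theorem pv_keys_insert {κ ν : Type} [BEq κ] [LawfulBEq κ] (d : PySem.Dict κ ν) (k : κ) (v : ν) :
    (d.insert k v).keys =
      if d.items.any (fun p => p.1 == k) then d.keys else d.keys ++ [k] := by
  simp only [PySem.Dict.insert, PySem.Dict.contains, PySem.Dict.keys]
  split
  · rw [List.map_map]
    apply List.map_congr_left
    intro p _
    by_cases hp : (p.1 == k) = true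
    · simp [hp]
      exact (eq_of_beq hp).symm
    · simp [hp]
  · simp

theorem pv_keys_ofList (ps : List (String × Int)) (goal : Int) :
    (PySem.Dict.ofList (ps.map (fun p => (p.1, goal - p.2)))).keys =
      PySem.List.dedup (ps.map Prod.fst) := by
  induction ps using List.reverseRecOn with
  | nil => rfl
  | append_singleton ps p ih =>
    have hof : PySem.Dict.ofList ((ps ++ [p]).map (fun p => (p.1, goal - p.2)))
        = (PySem.Dict.ofList (ps.map (fun p => (p.1, goal - p.2)))).insert p.1 (goal - p.2) := by
      simp [PySem.Dict.ofList, PySem.Dict.update, List.foldl_append]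
    have hded : PySem.List.dedup ((ps ++ [p]).map Prod.fst)
        = PySem.Set.add (PySem.List.dedup (ps.map Prod.fst)) p.1 := by
      simp [PySem.List.dedup, PySem.Set.ofList, List.foldl_append]
    rw [hof, hded, pv_keys_insert, PySem.Set.add]
    have hcond : ((PySem.Dict.ofList (ps.map (fun p => (p.1, goal - p.2)))).items.any
        (fun q => q.1 == p.1))
        = (PySem.List.dedup (ps.map Prod.fst)).contains p.1 := by
      rw [Bool.eq_iff_iff]
      have hk := ih
      simp only [PySem.Dict.keys] at hk
      simp only [List.any_eq_true, List.contains_iff_exists_mem_beq]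
      constructor
      · rintro ⟨q, hq, hbe⟩
        refine ⟨q.1, ?_, by simp [eq_of_beq hbe]⟩
        rw [← hk]
        exact List.mem_map_of_mem hq
      · rintro ⟨x, hx, hbe⟩
        rw [← hk] at hx
        obtain ⟨q, hq, rfl⟩ := List.mem_map.mp hx
        exact ⟨q, hq, by simp [eq_of_beq hbe]⟩
    rw [hcond]
    simp only [PySem.Set.contains]
    rw [ih]
    rfl

theorem pv_next_mem (sizes : List (String × Int)) (goal : Int) (hne : sizes ≠ []) :
    nextKey sizes goal ∈ sizes.map Prod.fst := by
  unfold nextKey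
  rw [pv_keys_ofList]
  cases hs : PySem.List.sorted (PySem.List.dedup (sizes.map Prod.fst))
      (fun img => pyLook sizes img) true with
  | nil =>
    exfalso
    have hd : PySem.List.dedup (sizes.map Prod.fst) = [] :=
      (PySem.List.sorted_eq_nil_iff _ _ _).mp hs
    cases sizes with
    | nil => exact hne rfl
    | cons q qs =>
      have : q.1 ∈ PySem.List.dedup ((q :: qs).map Prod.fst) := by
        rw [PySem.List.mem_dedup]
        simp
      rw [hd] at this
      simp at this
  | cons a t =>
    have ha : a ∈ PySem.List.dedup (sizes.map Prod.fst) := by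
      rw [← PySem.List.mem_sorted _ (fun img => pyLook sizes img) true, hs]
      simp
    simp only [List.headI]
    exact (PySem.List.mem_dedup _ _).mp ha

theorem pv_erase_lt (sizes : List (String × Int)) (next : String)
    (hmem : next ∈ sizes.map Prod.fst) :
    (((PySem.Dict.mk sizes).erase next).items).length < sizes.length := by
  simp only [PySem.Dict.erase, PySem.Dict.items]
  rw [List.length_filter_lt_length_iff_exists]
  obtain ⟨p, hp, hpe⟩ := List.mem_map.mp hmem
  exact ⟨p, hp, by simp [hpe]⟩

def make_colAux (sizes : List (String × Int)) (goal : Int) (out : List String) : List String :=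
  if h : 0 < goal ∧ 0 < sizes.length then
    let next : String := nextKey sizes goal
    make_colAux (((PySem.Dict.mk sizes).erase next).items)
      (goal - pyLook sizes next) (out ++ [next])
  else out
termination_by sizes.length
decreasing_by
  exact pv_erase_lt _ _ (pv_next_mem _ _ (fun hnil => by simp [hnil] at h))

def make_col (sizes : List (String × Int)) (goal : Int) : List String :=
  make_colAux sizes goal []

-- ===== PORT B =====

def altWalk (order : List (String × Int)) (goal : Int) (out : List String) : List String :=
  match order with
  | [] => out
  | (img, size) :: rest =>
    if goal ≤ 0 then out else altWalk rest (goal - size) (out ++ [img])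

def make_col_alt (sizes : List (String × Int)) (goal : Int) : List String :=
  altWalk (PySem.List.sorted sizes (fun kv => -kv.2) false) goal []

-- ===== PRECONDITION & SPEC =====
-- Pre_ excludes association lists with duplicate keys: the `sizes` parameter is a Python dict,
-- which cannot hold duplicate keys, so such lists encode no input the Python function can receive.
def Pre_make_col (sizes : List (String × Int)) (goal : Int) : Prop :=
  (sizes.map Prod.fst).Nodup
instance (sizes : List (String × Int)) (goal : Int) : Decidable (Pre_make_col sizes goal) := by
  unfold Pre_make_col; infer_instance

def pvWitness_make_col : (List (String × Int)) × Int := ([("a", 3), ("b", 1), ("c", 3)], 4)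

def Spec_make_col (sizes : List (String × Int)) (goal : Int) (out : List String) : Prop :=
  out = make_col_alt sizes goal
instance (sizes : List (String × Int)) (goal : Int) (out : List String) :
    Decidable (Spec_make_col sizes goal out) := by unfold Spec_make_col; infer_instance

-- ===== CLAIM (what is proved, stated in full; the proofs are below) =====
def Claim_equal_make_col : Prop := ∀ (sizes : List (String × Int)) (goal : Int),
  Dom_make_col sizes goal → Pre_make_col sizes goal → Spec_make_col sizes goal (make_col sizes goal)

-- ===== LEMMAS AND PROOFS =====

-- Python's max()/first-max scan over a concat
theorem pv_max?_concat {α κ : Type} [LinearOrder κ] (xs : List α) (x : α) (key : α → κ) :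
    PySem.List.max? (xs ++ [x]) key =
      some ((PySem.List.max? xs key).elim x (fun m => if key m < key x then x else m)) := by
  cases h : PySem.List.max? xs key <;>
    simp [PySem.List.max?, List.foldl_append] at h ⊢ <;> rw [h] <;> simp
  split <;> simp

-- one insertion step of the stable descending insertion sort
theorem pv_sorted_rev_concat {α κ : Type} [LinearOrder κ] (xs : List α) (x : α) (key : α → κ) :
    PySem.List.sorted (xs ++ [x]) key true =
      PySem.List.insertBy (fun a b => decide (key b < key a)) x
        (PySem.List.sorted xs key true) := by
  rw [PySem.List.sorted_rev_eq_foldl_insertBy, PySem.List.sorted_rev_eq_foldl_insertBy,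
    List.foldl_append]
  rfl

-- the head of Python's stable reverse sort is the FIRST maximal element, and the tail is the
-- stable reverse sort of the rest
theorem pv_sorted_rev_eq_max_cons {α κ : Type} [BEq α] [LawfulBEq α] [LinearOrder κ]
    (xs : List α) (key : α → κ) (m : α) (hm : PySem.List.max? xs key = some m) :
    PySem.List.sorted xs key true = m :: PySem.List.sorted (xs.erase m) key true := by
  induction xs using List.reverseRecOn generalizing m with
  | nil => simp [PySem.List.max?] at hm
  | append_singleton xs x ih =>
    rw [pv_max?_concat] at hm
    cases h0 : PySem.List.max? xs key with
    | none =>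
      have hxs : xs = [] := (PySem.List.max?_eq_none_iff xs key).mp h0
      subst hxs
      rw [h0] at hm
      simp at hm
      subst hm
      simp [PySem.List.sorted, PySem.List.insertBy]
    | some m0 =>
      rw [h0] at hm
      simp at hm
      by_cases hlt : key m0 < key x
      · rw [if_pos hlt] at hm
        subst hm
        have hnot : x ∉ xs := by
          intro hx
          exact absurd (PySem.List.max?_isMax h0 x hx) (by simp [hlt])
        rw [pv_sorted_rev_concat, List.erase_append_right _ hnot]
        simp only [List.erase_cons_head, List.append_nil]
        cases hs : PySem.List.sorted xs key true with
        | nil =>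
          have hxs : xs = [] := (PySem.List.sorted_eq_nil_iff xs key true).mp hs
          subst hxs
          simp [PySem.List.insertBy, PySem.List.sorted]
        | cons y t =>
          have hy : y ∈ xs := by
            rw [← PySem.List.mem_sorted xs key true]
            simp [hs]
          have hyx : key y < key x := lt_of_le_of_lt (PySem.List.max?_isMax h0 y hy) hlt
          rw [hs] at *
          simp [PySem.List.insertBy, hyx]
      · rw [if_neg hlt] at hm
        subst hm
        have hmem : m0 ∈ xs := PySem.List.max?_mem h0
        rw [pv_sorted_rev_concat, ih m0 h0, List.erase_append_left _ hmem,
          pv_sorted_rev_concat]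
        simp [PySem.List.insertBy, hlt]

-- first-max commutes with mapping when the keys correspond on the list
theorem pv_max?_map_aux {α β κ : Type} [LinearOrder κ] (f : α → β) (g : β → κ) (key : α → κ)
    (xs : List α) (acc : Option α)
    (hxs : ∀ x ∈ xs, g (f x) = key x) (hacc : ∀ a, acc = some a → g (f a) = key a) :
    List.foldl (fun acc x => match acc with
        | none => some x
        | some m => if g m < g x then some x else some m) (acc.map f) (xs.map f)
      = (List.foldl (fun acc x => match acc with
        | none => some x
        | some m => if key m < key x then some x else some m) acc xs).map f := by
  induction xs generalizing acc with
  | nil => simp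
  | cons x xs ih =>
    simp only [List.map_cons, List.foldl_cons]
    have hstep : (match acc.map f with
        | none => some (f x)
        | some m => if g m < g (f x) then some (f x) else some m)
        = (match acc with
        | none => some x
        | some m => if key m < key x then some x else some m).map f := by
      cases acc with
      | none => rfl
      | some a =>
        simp only [Option.map_some]
        rw [hacc a rfl, hxs x (by simp)]
        split <;> simp
    rw [hstep]
    apply ih
    · intro y hy; exact hxs y (by simp [hy])
    · intro a ha
      cases acc with
      | none =>
        cases ha
        exact hxs x (by simp)
      | some b =>
        simp only [] at ha
        by_cases hk : key b < key x
        · rw [if_pos hk] at ha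
          injection ha with ha
          subst ha
          exact hxs x (by simp)
        · rw [if_neg hk] at ha
          injection ha with ha
          subst ha
          exact hacc b rfl

theorem pv_max?_map {α β κ : Type} [LinearOrder κ] (f : α → β) (g : β → κ) (key : α → κ)
    (xs : List α) (hxs : ∀ x ∈ xs, g (f x) = key x) :
    PySem.List.max? (xs.map f) g = (PySem.List.max? xs key).map f := by
  simpa [PySem.List.max?] using
    pv_max?_map_aux f g key xs none hxs (by intro a h; cases h)

-- in a duplicate-free association list, sizes[p.1] is p.2
theorem pv_pyLook (sizes : List (String × Int)) (p : String × Int)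
    (hnd : (sizes.map Prod.fst).Nodup) (hp : p ∈ sizes) :
    pyLook sizes p.1 = p.2 := by
  induction sizes with
  | nil => cases hp
  | cons q qs ih =>
    simp only [List.map_cons, List.nodup_cons] at hnd
    rcases List.mem_cons.mp hp with rfl | hps
    · simp [pyLook, PySem.Dict.getD, PySem.Dict.get?, List.find?]
    · have hq : (q.1 == p.1) = false := by
        simp only [beq_eq_false_iff_ne, ne_eq]
        intro he
        exact hnd.1 (he ▸ List.mem_map_of_mem hps)
      have := ih hnd.2 hps
      simpa [pyLook, PySem.Dict.getD, PySem.Dict.get?, List.find?, hq] using this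

-- dict.pop of the unique pair with that key = List.erase of the pair
theorem pv_filter_eq_erase (sizes : List (String × Int)) (m : String × Int)
    (hnd : (sizes.map Prod.fst).Nodup) (hm : m ∈ sizes) :
    sizes.filter (fun p => !(p.1 == m.1)) = sizes.erase m := by
  induction sizes with
  | nil => cases hm
  | cons q qs ih =>
    simp only [List.map_cons, List.nodup_cons] at hnd
    rcases List.mem_cons.mp hm with rfl | hms
    · rw [List.erase_cons_head]
      simp only [List.filter_cons, beq_self_eq_true, Bool.not_true]
      apply List.filter_eq_self.mpr
      intro p hp
      have hne : p.1 ≠ m.1 := fun he => hnd.1 (he ▸ List.mem_map_of_mem hp)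
      simp [hne]
    · have hqm : q ≠ m := by
        intro he
        exact hnd.1 (he ▸ List.mem_map_of_mem hms)
      have hq1 : (q.1 == m.1) = false := by
        simp only [beq_eq_false_iff_ne, ne_eq]
        intro he
        exact hnd.1 (he ▸ List.mem_map_of_mem hms)
      rw [List.erase_cons_tail (by simpa using hqm)]
      simp [List.filter_cons, hq1, ih hnd.2 hms]

-- list(dict.fromkeys(xs)) = xs when xs has no duplicates
theorem pv_dedup_aux {α : Type} [BEq α] [LawfulBEq α] (xs acc : List α)
    (hdis : ∀ x ∈ xs, x ∉ acc) (hnd : xs.Nodup) :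
    List.foldl PySem.Set.add acc xs = acc ++ xs := by
  induction xs generalizing acc with
  | nil => simp
  | cons x xs ih =>
    simp only [List.foldl_cons]
    have hc : PySem.Set.add acc x = acc ++ [x] := by
      have hx : x ∉ acc := hdis x (by simp)
      simp [PySem.Set.add, PySem.Set.contains, hx]
    rw [hc, ih]
    · simp
    · intro y hy
      simp only [List.mem_append, List.mem_singleton]
      rintro (hya | rfl)
      · exact hdis y (by simp [hy]) hya
      · exact (List.nodup_cons.mp hnd).1 hy
    · exact (List.nodup_cons.mp hnd).2

theorem pv_dedup_self {α : Type} [BEq α] [LawfulBEq α] (xs : List α) (hnd : xs.Nodup) :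
    PySem.List.dedup xs = xs := by
  simpa [PySem.List.dedup, PySem.Set.ofList, PySem.Set.empty] using
    pv_dedup_aux xs [] (by simp) hnd

-- B's ascending sort by -size IS the stable reverse sort by size
theorem pv_sorted_neg (xs : List (String × Int)) :
    PySem.List.sorted xs (fun kv => -kv.2) false = PySem.List.sorted xs (fun kv => kv.2) true := by
  simp only [PySem.List.sorted, if_true, if_false, Bool.false_eq_true]
  have hb : (fun a b : String × Int => decide (-a.2 < -b.2))
      = fun a b : String × Int => decide (b.2 < a.2) := by
    funext a b
    rw [decide_eq_decide]
    omega
  rw [hb]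

-- the main loop correspondence: A's loop over the remaining dict = B's walk over the
-- stable descending sort
theorem pv_main (n : Nat) : ∀ (sizes : List (String × Int)) (goal : Int) (out : List String),
    sizes.length ≤ n → (sizes.map Prod.fst).Nodup →
    make_colAux sizes goal out
      = altWalk (PySem.List.sorted sizes (fun kv => kv.2) true) goal out := by
  induction n with
  | zero =>
    intro sizes goal out hlen _
    have : sizes = [] := List.length_eq_zero_iff.mp (Nat.le_zero.mp hlen)
    subst this
    rw [make_colAux]
    simp [altWalk, PySem.List.sorted]
  | succ n ih =>
    intro sizes goal out hlen hnd
    cases hmax : PySem.List.max? sizes (fun kv => kv.2) with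
    | none =>
      have : sizes = [] := (PySem.List.max?_eq_none_iff _ _).mp hmax
      subst this
      rw [make_colAux]
      simp [altWalk, PySem.List.sorted]
    | some m =>
      have hne : sizes ≠ [] := by
        intro h
        subst h
        simp [PySem.List.max?] at hmax
      have hmem : m ∈ sizes := PySem.List.max?_mem hmax
      rw [pv_sorted_rev_eq_max_cons _ _ _ hmax]
      by_cases hg : 0 < goal
      · rw [make_colAux, dif_pos ⟨hg, by cases sizes with | nil => exact absurd rfl hne | cons a l => simp⟩]
        have hnext : nextKey sizes goal = m.1 := by
          unfold nextKey
          rw [pv_keys_ofList, pv_dedup_self _ hnd,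
            pv_sorted_rev_eq_max_cons _ _ m.1
              (by rw [pv_max?_map Prod.fst (fun img => pyLook sizes img) (fun kv => kv.2) sizes
                    (fun p hp => pv_pyLook sizes p hnd hp), hmax]; rfl)]
          rfl
        have hlook : pyLook sizes m.1 = m.2 := pv_pyLook sizes m hnd hmem
        have herase : ((PySem.Dict.mk sizes).erase m.1).items = sizes.erase m := by
          show sizes.filter (fun p => !(p.1 == m.1)) = sizes.erase m
          exact pv_filter_eq_erase sizes m hnd hmem
        simp only [hnext, hlook, herase]
        have hnd' : ((sizes.erase m).map Prod.fst).Nodup :=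
          ((List.erase_sublist).map Prod.fst).nodup hnd
        have hlen' : (sizes.erase m).length ≤ n := by
          rw [List.length_erase_of_mem hmem]
          omega
        rw [ih _ _ _ hlen' hnd']
        obtain ⟨k, v⟩ := m
        simp [altWalk, not_le.mpr hg]
      · rw [make_colAux, dif_neg (fun hc => hg hc.1)]
        obtain ⟨k, v⟩ := m
        have hgle : goal ≤ 0 := by omega
        simp [altWalk, hgle]

-- ===== VERDICT (by name: the statement is the Claim_ definition above) =====
theorem make_col_spec : Claim_equal_make_col := by
  intro sizes goal _ hpre
  unfold Spec_make_col make_col make_col_alt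
  rw [pv_sorted_neg]
  exact pv_main sizes.length sizes goal [] le_rfl hpre
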